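-- pv_equiv track=rewrite | github.com/ackwell/ninjabot | Plugins/apis/ncss.py | generate_students_delta
-- ===== SOURCE A (Python) =====
-- ADDED = 1
--
-- CHANGED = 2
--
-- REMOVED = 3
--
-- def generate_students_delta(old, new):
--     delta = dict()
--
--     for name in new:
--         if name not in old:
--             delta[name] = (new[name], ADDED)
--         elif old[name] != new[name]:
--             delta[name] = (new[name], CHANGED)
--     for name in old:
--         if name not in new:
--             delta[name] = (old[name], REMOVED)
--
--     return delta
-- ===== SOURCE B (Python) =====
-- ADDED = 1
--
-- CHANGED = 2
--
-- REMOVED = 3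
--
-- def generate_students_delta(old, new):
--     # Full outer join: merge both dicts into one map name -> (old value or None, new value or None),
--     # then classify each joined record in a single pass (no membership tests or lookups).
--     merged = {}
--     for name, val in new.items():
--         merged[name] = (None, val)
--     for name, val in old.items():
--         pair = merged.get(name)
--         merged[name] = (val, pair[1] if pair is not None else None)
--
--     delta = {}
--     for name, (o, n) in merged.items():
--         if o is None:
--             delta[name] = (n, ADDED)
--         elif n is None:
--             delta[name] = (o, REMOVED)
--         elif o != n:
--             delta[name] = (n, CHANGED)
--     return delta
-- ===== Notes on version B (the rewrite author's own statement) =====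
-- stated objective: alternative
-- what changed: B replaces A's two membership-guarded lookup loops by a full outer join: it first merges both dicts into one map name -> (old value or None, new value or None), then classifies each joined record in a single pass with no membership tests or dict lookups.
import Mathlib
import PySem

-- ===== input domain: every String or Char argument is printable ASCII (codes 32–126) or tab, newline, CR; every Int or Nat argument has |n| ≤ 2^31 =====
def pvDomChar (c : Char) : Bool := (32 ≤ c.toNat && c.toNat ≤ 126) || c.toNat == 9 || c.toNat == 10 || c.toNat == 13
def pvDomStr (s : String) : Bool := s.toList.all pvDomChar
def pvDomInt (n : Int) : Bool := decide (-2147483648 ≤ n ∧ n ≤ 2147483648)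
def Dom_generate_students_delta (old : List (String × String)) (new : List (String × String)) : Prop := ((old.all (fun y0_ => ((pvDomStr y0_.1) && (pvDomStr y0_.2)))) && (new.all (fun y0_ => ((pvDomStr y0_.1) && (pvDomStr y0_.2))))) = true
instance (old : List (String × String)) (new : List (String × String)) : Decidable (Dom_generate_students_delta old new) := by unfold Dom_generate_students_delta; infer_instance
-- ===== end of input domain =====

-- B computes a full outer join of the two dicts (name -> (old value?, new value?)) and then
-- classifies each joined record in one pass, instead of A's two membership-guarded lookup loops
-- (objective: alternative).


-- ===== PORT A =====
-- The assoc list encodes a Python dict with FIRST binding winning: its key sequence is the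
-- deduped key list (first occurrences) and lookup is first-match (List.lookup).
def pvContains (d : List (String × String)) (k : String) : Bool := (d.lookup k).isSome
def pvGet (d : List (String × String)) (k : String) : String := (d.lookup k).getD ""

-- Both loops of A only ever insert FRESH keys into `delta`, so each dict insertion is an append.
def generate_students_delta (old : List (String × String)) (new : List (String × String)) : List (String × String × Int) :=
  let delta := (PySem.List.dedup (new.map Prod.fst)).foldl (fun delta name =>
      if pvContains old name = false then delta ++ [(name, pvGet new name, (1 : Int))]
      else if pvGet old name ≠ pvGet new name then delta ++ [(name, pvGet new name, (2 : Int))]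
      else delta) []
  (PySem.List.dedup (old.map Prod.fst)).foldl (fun delta name =>
      if pvContains new name = false then delta ++ [(name, pvGet old name, (3 : Int))]
      else delta) delta

-- ===== PORT B =====
-- d.items() of a dict encoded as an assoc list: deduped keys paired with their (first-match) values.
def pvItems (d : List (String × String)) : List (String × String) :=
  (PySem.List.dedup (d.map Prod.fst)).map (fun k => (k, pvGet d k))

def generate_students_delta_alt (old : List (String × String)) (new : List (String × String)) : List (String × String × Int) :=
  let m1 : PySem.Dict String (Option String × Option String) :=
    (pvItems new).foldl (fun m p => m.insert p.1 (none, some p.2)) PySem.Dict.empty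
  let merged :=
    (pvItems old).foldl (fun m p =>
      m.insert p.1 (some p.2, match m.get? p.1 with | some pr => pr.2 | none => none)) m1
  -- classification loop: delta's keys are merged's (distinct) keys, so each insertion appends
  merged.items.foldl (fun acc q =>
      match q.2.1, q.2.2 with
      | none, some v => acc ++ [(q.1, v, (1 : Int))]
      | some a, none => acc ++ [(q.1, a, (3 : Int))]
      | some a, some b => if a ≠ b then acc ++ [(q.1, b, (2 : Int))] else acc
      | none, none => acc) []

-- ===== PRECONDITION & SPEC =====
def Spec_generate_students_delta (old : List (String × String)) (new : List (String × String)) (out : List (String × String × Int)) : Prop := out = generate_students_delta_alt old new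
instance (old : List (String × String)) (new : List (String × String)) (out : List (String × String × Int)) : Decidable (Spec_generate_students_delta old new out) := by unfold Spec_generate_students_delta; infer_instance

-- ===== CLAIM (what is proved, stated in full; the proofs are below) =====
def Claim_equal_generate_students_delta : Prop := ∀ (old : List (String × String)) (new : List (String × String)), Dom_generate_students_delta old new → Spec_generate_students_delta old new (generate_students_delta old new)

-- ===== LEMMAS AND PROOFS =====

-- A fold whose step appends the (optional) entry of `h` equals `acc ++ filterMap h`.
theorem pv_foldl_opt {α β : Type} (step : List β → α → List β) (h : α → Option β) :
    ∀ (l : List α), (∀ a ∈ l, ∀ acc, step acc a = acc ++ (h a).toList) →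
    ∀ acc, l.foldl step acc = acc ++ l.filterMap h := by
  intro l
  induction l with
  | nil => intro _ acc; simp
  | cons a l ih =>
    intro H acc
    simp only [List.foldl_cons, List.filterMap_cons]
    rw [H a (List.mem_cons_self), ih (fun b hb => H b (List.mem_cons_of_mem _ hb))]
    cases h a <;> simp

theorem pv_filterMap_guard {α β : Type} (p : α → Bool) (h : α → Option β) (l : List α) :
    l.filterMap (fun a => if p a then h a else none) = (l.filter p).filterMap h := by
  induction l with
  | nil => rfl
  | cons a l ih =>
    by_cases hp : p a
    · cases hfa : h a <;> simp [hp, hfa, ih]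
    · simp [hp, ih]

-- pvContains is membership in the key list
theorem pv_contains_eq (d : List (String × String)) (k : String) :
    pvContains d k = decide (k ∈ d.map Prod.fst) := by
  induction d with
  | nil => rfl
  | cons kv t ih =>
    by_cases hk : (k == kv.1) = true
    · have : k = kv.1 := by simpa using hk
      simp [pvContains, List.lookup, hk, this]
    · rw [Bool.not_eq_true] at hk
      have hne : k ≠ kv.1 := by intro h; rw [h] at hk; simp at hk
      simp only [pvContains, List.lookup, hk] at ih ⊢
      simp [ih, hne]

-- lookup in a key->value tabulation list
theorem pv_lookup_tab {β : Type} (f : String → β) (l : List String) (k : String) :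
    (l.map (fun x => (x, f x))).lookup k = if k ∈ l then some (f k) else none := by
  induction l with
  | nil => rfl
  | cons a l ih =>
    by_cases hk : k = a
    · subst hk; simp [List.lookup]
    · have : (k == a) = false := by simp [hk]
      simp [List.lookup, this, ih, hk]

-- the per-item effect of the join's second loop on an already-present item
def pvUpd (olds : List (String × String)) (q : String × (Option String × Option String)) :
    String × (Option String × Option String) :=
  match olds.lookup q.1 with
  | some v => (q.1, (some v, q.2.2))
  | none => q

-- the join loop over `old`'s items: in-place update of present keys, append of fresh keys
theorem pv_join_loop (olds : List (String × String)) :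
    ∀ (m : PySem.Dict String (Option String × Option String)),
    (olds.map Prod.fst).Nodup → m.keys.Nodup →
    (olds.foldl (fun m p =>
        m.insert p.1 (some p.2, match m.get? p.1 with | some pr => pr.2 | none => none)) m).items
      = m.items.map (pvUpd olds)
        ++ (olds.filter (fun p => !m.contains p.1)).map (fun p => (p.1, (some p.2, none))) := by
  induction olds with
  | nil =>
    intro m _ _
    simp [show pvUpd [] = id from funext fun q => rfl]
  | cons p rest ih =>
    intro m hnd hm
    have hnd' : (p.1 :: rest.map Prod.fst).Nodup := by simpa using hnd
    have hndr : (rest.map Prod.fst).Nodup := hnd'.of_cons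
    have hp_notin : p.1 ∉ rest.map Prod.fst := (List.nodup_cons.mp hnd').1
    have hlookup_rest : rest.lookup p.1 = none := by
      have h1 : pvContains rest p.1 = false := by
        rw [pv_contains_eq]; simpa using hp_notin
      cases hlk : rest.lookup p.1 with
      | none => rfl
      | some w => rw [pvContains, hlk] at h1; simp at h1
    simp only [List.foldl_cons]
    by_cases hc : m.contains p.1 = true
    · -- key already present: in-place replacement of its single item
      set v : Option String × Option String :=
        (some p.2, match m.get? p.1 with | some pr => pr.2 | none => none) with hv
      have hitems := PySem.Dict.items_insert_of_contains m (k := p.1) v hc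
      have hkeys : (m.insert p.1 v).keys = m.keys :=
        PySem.Dict.keys_insert_of_contains m (k := p.1) v hc
      have hm' : (m.insert p.1 v).keys.Nodup := by rw [hkeys]; exact hm
      rw [ih (m.insert p.1 v) hndr hm', hitems]
      have hcont : ∀ x, (m.insert p.1 v).contains x = m.contains x := by
        intro x
        rw [PySem.Dict.contains_eq_decide_mem_keys, hkeys,
          ← PySem.Dict.contains_eq_decide_mem_keys]
      have hfilter : rest.filter (fun r => !(m.insert p.1 v).contains r.1)
          = rest.filter (fun r => !m.contains r.1) := by
        apply List.filter_congr; intro r _; rw [hcont]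
      have hfilter2 : (p :: rest).filter (fun r => !m.contains r.1)
          = rest.filter (fun r => !m.contains r.1) := by
        simp [List.filter_cons, hc]
      rw [hfilter, hfilter2, List.map_map]
      congr 1
      apply List.map_congr_left
      rintro ⟨qk, qv⟩ hq
      by_cases hqk : qk = p.1
      · subst hqk
        have hget : m.get? p.1 = some qv := PySem.Dict.get?_of_mem_items m hq hm
        simp only [Function.comp, BEq.rfl, if_pos rfl]
        simp [pvUpd, List.lookup, hlookup_rest, hget, hv]
      · have hbeq : (qk == p.1) = false := by simp [hqk]
        simp only [Function.comp, hbeq, Bool.false_eq_true, if_neg (by simp [hqk] : ¬ ((qk == p.1) = true))]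
        simp [pvUpd, List.lookup, hbeq]
    · -- fresh key: appended at the end with no old counterpart
      rw [Bool.not_eq_true] at hc
      have hget : m.get? p.1 = none := (PySem.Dict.get?_eq_none_iff_contains m p.1).mpr hc
      set v : Option String × Option String := (some p.2, none) with hv
      have hstep : m.insert p.1 (some p.2, match m.get? p.1 with | some pr => pr.2 | none => none)
          = m.insert p.1 v := by rw [hget]
      have hitems := PySem.Dict.items_insert_of_not_contains m (k := p.1) v hc
      have hm' : (m.insert p.1 v).keys.Nodup := PySem.Dict.nodup_keys_insert m p.1 v hm
      rw [hstep, ih (m.insert p.1 v) hndr hm', hitems]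
      have hnotin_items : ∀ q ∈ m.items, q.1 ≠ p.1 := by
        intro q hq hqe
        have hck : m.contains p.1 = true := by
          rw [PySem.Dict.contains_eq_decide_mem_keys]
          simp only [decide_eq_true_eq]
          rw [← hqe]
          exact PySem.Dict.mem_keys_of_mem_items m hq
        rw [hc] at hck; exact Bool.false_ne_true hck
      have hfilter : rest.filter (fun r => !(m.insert p.1 v).contains r.1)
          = rest.filter (fun r => !m.contains r.1) := by
        apply List.filter_congr; intro r hr
        rw [PySem.Dict.contains_insert]
        have hrne : (r.1 == p.1) = false := by
          have : r.1 ≠ p.1 := by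
            intro h
            exact hp_notin (h ▸ List.mem_map_of_mem hr)
          simp [this]
        rw [hrne, Bool.false_or]
      have hfilter2 : (p :: rest).filter (fun r => !m.contains r.1)
          = p :: rest.filter (fun r => !m.contains r.1) := by
        simp [List.filter_cons, hc]
      rw [hfilter, hfilter2, List.map_append]
      have hmap : m.items.map (pvUpd rest) = m.items.map (pvUpd (p :: rest)) := by
        apply List.map_congr_left
        intro q hq
        have : (q.1 == p.1) = false := by simp [hnotin_items q hq]
        simp [pvUpd, List.lookup, this]
      rw [hmap]
      simp [pvUpd, List.lookup, hlookup_rest, hv]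

theorem generate_students_delta_eq (old new : List (String × String)) :
    generate_students_delta old new = generate_students_delta_alt old new := by
  unfold generate_students_delta generate_students_delta_alt
  set N := PySem.List.dedup (new.map Prod.fst) with hN
  set O := PySem.List.dedup (old.map Prod.fst) with hO
  -- m1: the first join loop appends the fresh keys of `new`
  have hfreshN : ∀ p ∈ pvItems new, (PySem.Dict.empty : PySem.Dict String (Option String × Option String)).contains p.1 = false := by
    intro p _; exact PySem.Dict.contains_empty _
  have hmapfstN : (pvItems new).map Prod.fst = N := by
    simp [pvItems, List.map_map, Function.comp_def, hN]
  have hndN : ((pvItems new).map Prod.fst).Nodup := by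
    rw [hmapfstN]; exact PySem.List.nodup_dedup (new.map Prod.fst)
  have hm1 : ((pvItems new).foldl (fun m p => m.insert p.1 ((none : Option String), some p.2)) PySem.Dict.empty).items
      = N.map (fun k => (k, ((none : Option String), some (pvGet new k)))) := by
    rw [PySem.Dict.items_foldl_insert_fresh (pvItems new) Prod.fst
      (fun p => ((none : Option String), some p.2)) PySem.Dict.empty hfreshN hndN]
    simp [pvItems, List.map_map, Function.comp_def, hN, PySem.Dict.empty, PySem.Dict.items]
  set m1 := (pvItems new).foldl (fun m p => m.insert p.1 ((none : Option String), some p.2)) PySem.Dict.empty with hm1def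
  have hkeys1 : m1.keys = N := by
    show m1.items.map Prod.fst = N
    rw [hm1]; simp [List.map_map, Function.comp_def]
  have hnd1 : m1.keys.Nodup := by rw [hkeys1]; exact PySem.List.nodup_dedup _
  have hndO : ((pvItems old).map Prod.fst).Nodup := by
    have : (pvItems old).map Prod.fst = O := by simp [pvItems, List.map_map, Function.comp_def, hO]
    rw [this]; exact PySem.List.nodup_dedup (old.map Prod.fst)
  -- contains on m1 is membership in N
  have hcont1 : ∀ k, m1.contains k = decide (k ∈ N) := by
    intro k; rw [PySem.Dict.contains_eq_decide_mem_keys, hkeys1]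
  -- characterise merged.items
  have hmerged := pv_join_loop (pvItems old) m1 hndO hnd1
  have hlookO : ∀ k, (pvItems old).lookup k = if k ∈ O then some (pvGet old k) else none := by
    intro k; simpa [pvItems] using pv_lookup_tab (pvGet old) O k
  have hmemO : ∀ k, decide (k ∈ O) = pvContains old k := by
    intro k
    rw [pv_contains_eq]
    simp [hO, PySem.List.mem_dedup]
  have hmemN : ∀ k, decide (k ∈ N) = pvContains new k := by
    intro k
    rw [pv_contains_eq]
    simp [hN, PySem.List.mem_dedup]
  -- abbreviate the classification step
  set cls : String × (Option String × Option String) → Option (String × String × Int) :=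
    fun q => match q.2.1, q.2.2 with
      | none, some v => some (q.1, v, (1 : Int))
      | some a, none => some (q.1, a, (3 : Int))
      | some a, some b => if a ≠ b then some (q.1, b, (2 : Int)) else none
      | none, none => none with hcls
  -- the B side equals filterMap cls over the characterised merged items
  have hB : (((pvItems old).foldl (fun m p =>
        m.insert p.1 (some p.2, match m.get? p.1 with | some pr => pr.2 | none => none)) m1).items).foldl
      (fun acc q => match q.2.1, q.2.2 with
        | none, some v => acc ++ [(q.1, v, (1 : Int))]
        | some a, none => acc ++ [(q.1, a, (3 : Int))]
        | some a, some b => if a ≠ b then acc ++ [(q.1, b, (2 : Int))] else acc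
        | none, none => acc) []
      = (((pvItems old).foldl (fun m p =>
        m.insert p.1 (some p.2, match m.get? p.1 with | some pr => pr.2 | none => none)) m1).items).filterMap cls := by
    rw [pv_foldl_opt _ cls _ ?_ []]
    · simp
    · intro q _ acc
      rcases q with ⟨k, o, n⟩
      cases o <;> cases n <;> simp [hcls] <;> split_ifs <;> simp
  rw [hB, hmerged, hm1, List.filterMap_append, List.map_map,
    List.filterMap_map, List.filterMap_map]
  -- A side as filterMaps
  have hA1 : ∀ acc, N.foldl (fun delta name =>
      if pvContains old name = false then delta ++ [(name, pvGet new name, (1 : Int))]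
      else if pvGet old name ≠ pvGet new name then delta ++ [(name, pvGet new name, (2 : Int))]
      else delta) acc
      = acc ++ N.filterMap (fun name =>
          if pvContains old name = false then some (name, pvGet new name, (1 : Int))
          else if pvGet old name ≠ pvGet new name then some (name, pvGet new name, (2 : Int))
          else none) := by
    intro acc
    rw [pv_foldl_opt _ _ _ ?_ acc]
    intro a _ acc2
    split_ifs <;> simp
  have hA2 : ∀ acc, O.foldl (fun delta name =>
      if pvContains new name = false then delta ++ [(name, pvGet old name, (3 : Int))]
      else delta) acc
      = acc ++ O.filterMap (fun name =>
          if !pvContains new name then some (name, pvGet old name, (3 : Int)) else none) := by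
    intro acc
    rw [pv_foldl_opt _ _ _ ?_ acc]
    intro a _ acc2
    split_ifs with h <;> simp_all
  rw [hA2, hA1]
  simp only [List.nil_append]
  congr 1
  · -- added/changed part over N
    apply List.filterMap_congr
    intro k _
    by_cases hk : k ∈ O
    · have hco : pvContains old k = true := by rw [← hmemO k]; simp [hk]
      simp [Function.comp_def, pvUpd, hlookO, hk, hcls, hco]
    · have hco : pvContains old k = false := by rw [← hmemO k]; simp [hk]
      simp [Function.comp_def, pvUpd, hlookO, hk, hcls, hco]
  · -- removed part over O
    rw [pv_filterMap_guard (fun name => !pvContains new name)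
      (fun name => some (name, pvGet old name, (3 : Int))) O]
    have hfo : (pvItems old).filter (fun p => !m1.contains p.1)
        = (O.filter (fun k => !pvContains new k)).map (fun k => (k, pvGet old k)) := by
      simp only [pvItems, ← hO, List.filter_map, Function.comp_def]
      congr 1
      apply List.filter_congr
      intro k _
      rw [hcont1, hmemN]
    rw [hfo, List.filterMap_map]
    apply List.filterMap_congr
    intro k _
    simp [hcls, pvUpd, Function.comp_def]

-- ===== VERDICT (by name: the statement is the Claim_ definition above) =====
theorem generate_students_delta_spec : Claim_equal_generate_students_delta := by
  intro old new _
  unfold Spec_generate_students_delta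
  exact generate_students_delta_eq old new
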